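-- pv_equiv track=rewrite | github.com/nrgene/genomagic_qa | old_code/genotyper_code/analyzeSimilarities.py | getIndicesOfChromosomes
-- ===== SOURCE A (Python) =====
-- def getIndicesOfChromosomes(pos):
--     n=len(pos)
--     prev_chr=pos[0][0]
--     prev_pos=pos[0][1]
--     X=[]
--     X.append([prev_chr,0,-1])
--     for i in range(n):
--         if pos[i][0]!=prev_chr:
--             assert pos[i][0]>=prev_chr
--             X[-1][2]=i-1
--             X.append([pos[i][0],i,-1])
--         else:
--             assert pos[i][1]>=prev_pos
--         prev_chr=pos[i][0]
--         prev_pos=pos[i][1]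
--     X[-1][2]=n-1
--     for x in X:
--         vec=pos[x[1]:(x[2]+1)]
--         for v in vec:
--             assert v[0]==x[0]
--     return X
-- ===== SOURCE B (Python) =====
-- def getIndicesOfChromosomes(pos):
--     n = len(pos)
--     # validate sorting in one zipped pass (same invalid inputs as A's asserts)
--     for a, b in zip(pos, pos[1:]):
--         assert a[0] < b[0] or (a[0] == b[0] and a[1] <= b[1])
--     starts = [0] + [i for i in range(1, n) if pos[i][0] != pos[i - 1][0]]
--     ends = starts[1:] + [n]
--     return [[pos[s][0], s, e - 1] for s, e in zip(starts, ends)]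
-- ===== Notes on version B (the rewrite author's own statement) =====
-- stated objective: simpler
-- what changed: A builds the result inside a single index loop by appending a sentinel [chr, i, -1] entry and repeatedly mutating the last entry's end field (plus a second verification pass); B instead computes the list of chromosome-change boundary indices once with a comprehension, zips starts with shifted ends, and maps each pair to [chr, start, end-1] with no mutation and no second pass.
import Mathlib
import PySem

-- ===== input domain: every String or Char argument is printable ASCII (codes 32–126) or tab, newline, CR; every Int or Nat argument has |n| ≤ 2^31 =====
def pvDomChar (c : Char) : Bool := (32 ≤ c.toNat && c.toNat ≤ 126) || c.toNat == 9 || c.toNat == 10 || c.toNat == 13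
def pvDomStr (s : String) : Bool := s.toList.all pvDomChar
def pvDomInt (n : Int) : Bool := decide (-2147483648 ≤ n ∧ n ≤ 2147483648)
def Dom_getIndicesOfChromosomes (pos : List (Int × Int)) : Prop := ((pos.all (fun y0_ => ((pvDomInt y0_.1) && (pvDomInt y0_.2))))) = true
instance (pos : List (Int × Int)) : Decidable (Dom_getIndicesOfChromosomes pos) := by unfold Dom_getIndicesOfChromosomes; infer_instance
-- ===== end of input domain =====

-- B replaces A's mutate-the-last-entry index loop by a boundaries-then-zip construction (simpler, no mutation);
-- return value only — neither program mutates its argument.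

-- ===== PORT A =====
-- X[-1][2] = v  (set index 2 of the last inner list)
def pvSetLast2 : List (List Int) → Int → List (List Int)
  | [], _ => []
  | [x], v => [x.set 2 v]
  | x :: y :: xs, v => x :: pvSetLast2 (y :: xs) v

-- the body of A's 'for i in range(n)' loop; state = (X, prev_chr, prev_pos)
def stepA (pos : List (Int × Int)) (st : List (List Int) × Int × Int) (i : Int) :
    List (List Int) × Int × Int :=
  match PySem.List.pyGet? pos i with
  | none => st  -- unreachable: 0 ≤ i < len(pos)
  | some pi =>
    if pi.1 ≠ st.2.1 then
      (pvSetLast2 st.1 (i - 1) ++ [[pi.1, i, -1]], pi.1, pi.2)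
    else
      (st.1, pi.1, pi.2)

def getIndicesOfChromosomes (pos : List (Int × Int)) : List (List Int) :=
  let n : Int := pos.length
  match PySem.List.pyGet? pos 0 with
  | none => []  -- pos[0] raises IndexError on empty pos; excluded by Pre_
  | some p0 =>
    -- the asserts in the loop (and A's verification loop) fail only outside Pre_
    let st := (PySem.List.pyRange 0 n 1).foldl (stepA pos) ([[p0.1, (0 : Int), -1]], p0.1, p0.2)
    pvSetLast2 st.1 (n - 1)

-- ===== PORT B =====
-- pos[i][0] != pos[i-1][0]
def bChange (pos : List (Int × Int)) (i : Int) : Bool :=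
  ((PySem.List.pyGet? pos i).map Prod.fst) ≠ ((PySem.List.pyGet? pos (i - 1)).map Prod.fst)

-- starts = [0] + [i for i in range(1, n) if pos[i][0] != pos[i-1][0]]
def bStarts (pos : List (Int × Int)) : List Int :=
  0 :: (PySem.List.pyRange 1 pos.length 1).filter (bChange pos)

-- [pos[s][0], s, e - 1]
def bEntry (pos : List (Int × Int)) (se : Int × Int) : List Int :=
  match PySem.List.pyGet? pos se.1 with
  | none => []  -- pos[0] raises IndexError on empty pos; excluded by Pre_
  | some p => [p.1, se.1, se.2 - 1]

def getIndicesOfChromosomes_alt (pos : List (Int × Int)) : List (List Int) :=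
  -- the zipped validation pass only asserts; it fails only outside Pre_
  let starts := bStarts pos
  let ends := starts.tail ++ [(pos.length : Int)]
  (starts.zip ends).map (bEntry pos)

-- ===== PRECONDITION & SPEC =====
-- Pre_ excludes the empty list (A raises IndexError on pos[0]) and inputs not sorted by
-- chromosome then position within a chromosome run, on which A's asserts raise AssertionError.
def Pre_getIndicesOfChromosomes (pos : List (Int × Int)) : Prop :=
  pos ≠ [] ∧ List.IsChain (fun a b : Int × Int => a.1 < b.1 ∨ (a.1 = b.1 ∧ a.2 ≤ b.2)) pos
instance (pos : List (Int × Int)) : Decidable (Pre_getIndicesOfChromosomes pos) := by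
  unfold Pre_getIndicesOfChromosomes; infer_instance

def pvWitness_getIndicesOfChromosomes : (List (Int × Int)) := [(1, 5), (1, 7), (2, 3), (3, 3)]

def Spec_getIndicesOfChromosomes (pos : List (Int × Int)) (out : List (List Int)) : Prop := out = getIndicesOfChromosomes_alt pos
instance (pos : List (Int × Int)) (out : List (List Int)) : Decidable (Spec_getIndicesOfChromosomes pos out) := by unfold Spec_getIndicesOfChromosomes; infer_instance

-- ===== CLAIM (what is proved, stated in full; the proofs are below) =====
def Claim_equal_getIndicesOfChromosomes : Prop := ∀ (pos : List (Int × Int)), Dom_getIndicesOfChromosomes pos → Pre_getIndicesOfChromosomes pos → Spec_getIndicesOfChromosomes pos (getIndicesOfChromosomes pos)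

-- ===== LEMMAS AND PROOFS =====

theorem pvSetLast2_append (X : List (List Int)) (x : List Int) (v : Int) :
    pvSetLast2 (X ++ [x]) v = X ++ [x.set 2 v] := by
  induction X with
  | nil => rfl
  | cons a X ih =>
    cases X with
    | nil => rfl
    | cons b X => simpa [pvSetLast2] using ih

theorem pvSetLast2_ne_nil (X : List (List Int)) (v : Int) (h : X ≠ []) :
    pvSetLast2 X v ≠ [] := by
  match X with
  | [x] => simp [pvSetLast2]
  | x :: y :: X => simp [pvSetLast2]

theorem pvSetLast2_cons_of_ne_nil (a : List Int) (X : List (List Int)) (v : Int)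
    (h : X ≠ []) : pvSetLast2 (a :: X) v = a :: pvSetLast2 X v := by
  match X with
  | y :: X => rfl

theorem pvSetLast2_idem (X : List (List Int)) (v w : Int) :
    pvSetLast2 (pvSetLast2 X v) w = pvSetLast2 X w := by
  induction X with
  | nil => rfl
  | cons a X ih =>
    cases X with
    | nil => simp [pvSetLast2, List.set_set]
    | cons b X =>
      have hne : (b :: X) ≠ [] := by simp
      rw [pvSetLast2_cons_of_ne_nil a _ v hne, pvSetLast2_cons_of_ne_nil a _ w hne,
        pvSetLast2_cons_of_ne_nil a _ w (pvSetLast2_ne_nil _ v hne), ih]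

theorem pyGet?_append_left' {α : Type} (l q : List α) (i : Int) (h0 : 0 ≤ i)
    (h1 : i < l.length) : PySem.List.pyGet? (l ++ q) i = PySem.List.pyGet? l i := by
  rw [PySem.List.pyGet?_of_nonneg _ h0, PySem.List.pyGet?_of_nonneg _ h0]
  exact List.getElem?_append_left (by omega)

theorem stepA_append (pos q : List (Int × Int)) (st : List (List Int) × Int × Int)
    (i : Int) (h0 : 0 ≤ i) (h1 : i < pos.length) :
    stepA (pos ++ q) st i = stepA pos st i := by
  simp [stepA, pyGet?_append_left' pos q i h0 h1]

theorem bChange_append (pos q : List (Int × Int)) (i : Int) (h0 : 1 ≤ i)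
    (h1 : i < pos.length) : bChange (pos ++ q) i = bChange pos i := by
  simp [bChange, pyGet?_append_left' pos q i (by omega) h1,
    pyGet?_append_left' pos q (i - 1) (by omega) (by omega)]

theorem mem_bStarts (pos : List (Int × Int)) (h : pos ≠ []) (s : Int)
    (hs : s ∈ bStarts pos) : 0 ≤ s ∧ s < pos.length := by
  have hlen : 0 < pos.length := List.length_pos_of_ne_nil h
  rcases hs with _ | hs
  · constructor
    · omega
    · exact_mod_cast hlen
  · have := (PySem.List.mem_pyRange_one).1 (List.mem_of_mem_filter (by assumption))
    omega

theorem bEntry_append (pos q : List (Int × Int)) (se : Int × Int) (h0 : 0 ≤ se.1)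
    (h1 : se.1 < pos.length) : bEntry (pos ++ q) se = bEntry pos se := by
  simp [bEntry, pyGet?_append_left' pos q se.1 h0 h1]

theorem getLast?_getElem (pos : List (Int × Int)) (c q : Int)
    (hl : pos.getLast? = some (c, q)) :
    PySem.List.pyGet? pos ((pos.length : Int) - 1) = some (c, q) := by
  have hne : pos ≠ [] := by rintro rfl; simp at hl
  have hlen : 0 < pos.length := List.length_pos_of_ne_nil hne
  rw [PySem.List.pyGet?_of_nonneg _ (by omega : (0:Int) ≤ (pos.length : Int) - 1)]
  have : ((pos.length : Int) - 1).toNat = pos.length - 1 := by omega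
  rw [this, ← List.getLast?_eq_getElem?, hl]

theorem bStarts_append (pos : List (Int × Int)) (p : Int × Int) (c q : Int)
    (hl : pos.getLast? = some (c, q)) :
    bStarts (pos ++ [p]) =
      bStarts pos ++ (if p.1 ≠ c then [(pos.length : Int)] else []) := by
  have hne : pos ≠ [] := by rintro rfl; simp at hl
  have hlen : 0 < pos.length := List.length_pos_of_ne_nil hne
  have hr : PySem.List.pyRange 1 ((pos.length : Int) + 1) 1 =
      PySem.List.pyRange 1 (pos.length : Int) 1 ++ [(pos.length : Int)] :=
    PySem.List.pyRange_one_succ_right (by exact_mod_cast hlen)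
  have hn : ((pos ++ [p]).length : Int) = (pos.length : Int) + 1 := by simp
  have hfc : (PySem.List.pyRange 1 (pos.length : Int) 1).filter (bChange (pos ++ [p])) =
      (PySem.List.pyRange 1 (pos.length : Int) 1).filter (bChange pos) := by
    apply List.filter_congr
    intro i hi
    have := (PySem.List.mem_pyRange_one).1 hi
    exact bChange_append pos [p] i (by omega) (by omega)
  have hget : PySem.List.pyGet? (pos ++ [p]) (pos.length : Int) = some p := by
    exact PySem.List.pyGet?_append_length pos [] p
  have hget' : PySem.List.pyGet? (pos ++ [p]) ((pos.length : Int) - 1) = some (c, q) := by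
    rw [pyGet?_append_left' pos [p] _ (by omega) (by omega)]
    exact getLast?_getElem pos c q hl
  have hlast : bChange (pos ++ [p]) (pos.length : Int) = decide (p.1 ≠ c) := by
    simp [bChange, hget']
  unfold bStarts
  rw [hn, hr, List.filter_append, hfc]
  by_cases hpc : p.1 ≠ c <;> simp [hlast, hpc]

-- setting the last end to the value it already has changes nothing
theorem pvSetLast2_noop (X : List (List Int)) (a b v : Int)
    (h : X.getLast? = some [a, b, v]) : pvSetLast2 X v = X := by
  have hne : X ≠ [] := by rintro rfl; simp at h
  have hg : X.getLast hne = [a, b, v] := by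
    have h2 := List.getLast?_eq_some_getLast (l := X) hne
    rw [h2] at h; exact Option.some.inj h
  conv_lhs => rw [← List.dropLast_append_getLast hne, hg]
  rw [pvSetLast2_append]
  conv_rhs => rw [← List.dropLast_append_getLast hne, hg]
  simp

-- B's step: appending one pair either extends the last range or opens a new one
theorem alt_snoc (pos : List (Int × Int)) (p : Int × Int) (c q : Int)
    (hl : pos.getLast? = some (c, q)) :
    getIndicesOfChromosomes_alt (pos ++ [p]) =
      if p.1 = c then pvSetLast2 (getIndicesOfChromosomes_alt pos) (pos.length : Int)
      else getIndicesOfChromosomes_alt pos ++ [[p.1, (pos.length : Int), (pos.length : Int)]] := by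
  have hne : pos ≠ [] := by rintro rfl; simp at hl
  have hget : PySem.List.pyGet? (pos ++ [p]) (pos.length : Int) = some p := by
    exact PySem.List.pyGet?_append_length pos [] p
  have hn : ((pos ++ [p]).length : Int) = (pos.length : Int) + 1 := by
    simp [List.length_append]
  have hmapc : ∀ (zs : List (Int × Int)), (∀ se ∈ zs, se.1 ∈ bStarts pos) →
      zs.map (bEntry (pos ++ [p])) = zs.map (bEntry pos) := by
    intro zs hzs
    apply List.map_congr_left
    intro se hse
    have hb := mem_bStarts pos hne se.1 (hzs se hse)
    exact bEntry_append pos [p] se hb.1 hb.2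
  unfold getIndicesOfChromosomes_alt
  rw [bStarts_append pos p c q hl, hn]
  by_cases hpc : p.1 = c
  · -- same chromosome: the last range is extended
    simp only [hpc, ne_eq, not_true_eq_false, if_false, if_true, List.append_nil]
    set t := (PySem.List.pyRange 1 (pos.length : Int) 1).filter (bChange pos) with ht
    have hbs : bStarts pos = (0 : Int) :: t := rfl
    have hnn : ((0 : Int) :: t) ≠ [] := by simp
    have hlen' : ((0 : Int) :: t).dropLast.length = t.length := by simp
    have hz : ∀ (v : Int), ((0 : Int) :: t).zip (t ++ [v])
        = ((0 : Int) :: t).dropLast.zip t ++ [(((0 : Int) :: t).getLast hnn, v)] := by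
      intro v
      conv_lhs => rw [← List.dropLast_append_getLast hnn]
      rw [List.zip_append hlen']
      rfl
    simp only [hbs, List.tail_cons]
    rw [hz ((pos.length : Int) + 1), hz (pos.length : Int)]
    rw [List.map_append, List.map_append]
    have hsub1 : ∀ se ∈ ((0 : Int) :: t).dropLast.zip t, se.1 ∈ bStarts pos := by
      intro se hse
      rw [hbs]
      exact List.dropLast_subset _ (List.of_mem_zip hse).1
    rw [hmapc _ hsub1]
    simp only [List.map_cons, List.map_nil]
    have hlastmem : ((0 : Int) :: t).getLast hnn ∈ bStarts pos := by
      rw [hbs]; exact List.getLast_mem _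
    have hbnd := mem_bStarts pos hne _ hlastmem
    obtain ⟨pl, hpl⟩ : ∃ pl, PySem.List.pyGet? pos (((0 : Int) :: t).getLast hnn) = some pl := by
      rw [PySem.List.pyGet?_of_nonneg _ hbnd.1]
      exact ⟨_, List.getElem?_eq_getElem (by omega)⟩
    have hpl' : PySem.List.pyGet? (pos ++ [p]) (((0 : Int) :: t).getLast hnn) = some pl := by
      rw [pyGet?_append_left' pos [p] _ hbnd.1 hbnd.2]; exact hpl
    rw [pvSetLast2_append]
    simp [bEntry, hpl, hpl']
  · -- new chromosome: a fresh [chr, n, n] range is appended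
    simp only [hpc, ne_eq, not_false_eq_true, if_true, if_false]
    set t := (PySem.List.pyRange 1 (pos.length : Int) 1).filter (bChange pos) with ht
    have hbs : bStarts pos = (0 : Int) :: t := rfl
    rw [hbs]
    have htail2 : (((0 : Int) :: t) ++ [(pos.length : Int)]).tail = t ++ [(pos.length : Int)] := rfl
    have htail : ((0 : Int) :: t).tail = t := rfl
    rw [htail2, htail]
    have hlen2 : ((0 : Int) :: t).length = (t ++ [(pos.length : Int)]).length := by simp
    rw [show (t ++ [(pos.length : Int)]) ++ [(pos.length : Int) + 1]
          = (t ++ [(pos.length : Int)]) ++ [(pos.length : Int) + 1] from rfl,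
      List.zip_append hlen2]
    rw [List.map_append]
    have hsub : ∀ se ∈ ((0 : Int) :: t).zip (t ++ [(pos.length : Int)]), se.1 ∈ bStarts pos := by
      intro se hse
      rw [hbs]; exact (List.of_mem_zip hse).1
    rw [hmapc _ hsub]
    simp [bEntry]

-- the loop invariant for A's fold, relative to B's result
theorem invariant (pos : List (Int × Int)) (p0 : Int × Int) (hh : pos.head? = some p0) :
    ∃ s c q, pos.getLast? = some (c, q) ∧
      (getIndicesOfChromosomes_alt pos).getLast? = some [c, s, (pos.length : Int) - 1] ∧
      (PySem.List.pyRange 0 (pos.length : Int) 1).foldl (stepA pos)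
          ([[p0.1, (0 : Int), -1]], p0.1, p0.2)
        = (pvSetLast2 (getIndicesOfChromosomes_alt pos) (-1), c, q) := by
  induction pos using List.reverseRecOn with
  | nil => simp at hh
  | append_singleton l p ih =>
    by_cases hl0 : l = []
    · subst hl0
      simp only [List.nil_append, List.head?_cons] at hh
      obtain rfl : p = p0 := Option.some.inj hh
      refine ⟨0, p.1, p.2, by simp, ?_, ?_⟩
      · have e1 : PySem.List.pyRange 1 1 1 = [] := by decide
        simp [getIndicesOfChromosomes_alt, bStarts, bEntry, e1]
      · have e1 : PySem.List.pyRange 1 1 1 = [] := by decide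
        have e2 : PySem.List.pyRange 0 1 1 = [0] := by decide
        simp [getIndicesOfChromosomes_alt, bStarts, bEntry, e1, e2, stepA, pvSetLast2]
    · obtain ⟨h0, hh0⟩ : ∃ h0, l.head? = some h0 := by
        cases l with
        | nil => exact absurd rfl hl0
        | cons a l => exact ⟨a, rfl⟩
      obtain rfl : h0 = p0 := by
        cases l with
        | nil => exact absurd rfl hl0
        | cons a l =>
          simp only [List.cons_append, List.head?_cons, Option.some.injEq] at hh hh0
          rw [← hh0]; exact hh
      obtain ⟨s, c, q, hl, hbl, hfold⟩ := ih hh0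
      have halne : getIndicesOfChromosomes_alt l ≠ [] := by
        rintro he; rw [he] at hbl; simp at hbl
      have hn : ((l ++ [p]).length : Int) = (l.length : Int) + 1 := by
        simp [List.length_append]
      have hr : PySem.List.pyRange 0 ((l.length : Int) + 1) 1
          = PySem.List.pyRange 0 (l.length : Int) 1 ++ [(l.length : Int)] :=
        PySem.List.pyRange_one_succ_right (by positivity)
      have hcongr : (PySem.List.pyRange 0 (l.length : Int) 1).foldl (stepA (l ++ [p]))
            ([[h0.1, (0 : Int), -1]], h0.1, h0.2)
          = (PySem.List.pyRange 0 (l.length : Int) 1).foldl (stepA l)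
            ([[h0.1, (0 : Int), -1]], h0.1, h0.2) := by
        apply PySem.List.foldl_congr_mem
        intro acc x hx
        have := (PySem.List.mem_pyRange_one).1 hx
        exact stepA_append l [p] acc x (by omega) (by omega)
      have hget : PySem.List.pyGet? (l ++ [p]) (l.length : Int) = some p := by
        exact PySem.List.pyGet?_append_length l [] p
      have hfold' : (PySem.List.pyRange 0 (((l ++ [p]).length : Int)) 1).foldl
            (stepA (l ++ [p])) ([[h0.1, (0 : Int), -1]], h0.1, h0.2)
          = stepA (l ++ [p]) (pvSetLast2 (getIndicesOfChromosomes_alt l) (-1), c, q)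
              (l.length : Int) := by
        rw [hn, hr, List.foldl_append, hcongr, hfold]
        rfl
      have hlast' : (l ++ [p]).getLast? = some p := by simp
      by_cases hpc : p.1 = c
      · -- same chromosome: A keeps X, B extends the last range
        refine ⟨s, p.1, p.2, hlast', ?_, ?_⟩
        · rw [alt_snoc l p c q hl, if_pos hpc]
          have e : getIndicesOfChromosomes_alt l
              = (getIndicesOfChromosomes_alt l).dropLast ++ [[c, s, (l.length : Int) - 1]] := by
            have hg2 : (getIndicesOfChromosomes_alt l).getLast halne = [c, s, (l.length : Int) - 1] := by
              have h2 := List.getLast?_eq_some_getLast (l := getIndicesOfChromosomes_alt l) halne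
              rw [h2] at hbl; exact Option.some.inj hbl
            conv_lhs => rw [← List.dropLast_append_getLast halne, hg2]
          rw [e, pvSetLast2_append]
          simp [hpc]
        · rw [hfold']
          simp only [stepA, hget]
          rw [if_neg (by simp [hpc]), alt_snoc l p c q hl, if_pos hpc, pvSetLast2_idem]
      · -- new chromosome: A closes the last range and opens [p.1, n, -1]
        refine ⟨(l.length : Int), p.1, p.2, hlast', ?_, ?_⟩
        · rw [alt_snoc l p c q hl, if_neg hpc]
          simp
        · rw [hfold']
          simp only [stepA, hget]
          rw [if_pos hpc, alt_snoc l p c q hl, if_neg hpc, pvSetLast2_append,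
            pvSetLast2_idem, pvSetLast2_noop _ c s ((l.length : Int) - 1) hbl]
          simp

theorem main_eq (pos : List (Int × Int)) (h : pos ≠ []) :
    getIndicesOfChromosomes pos = getIndicesOfChromosomes_alt pos := by
  obtain ⟨h0, rest, rfl⟩ := List.exists_cons_of_ne_nil h
  obtain ⟨s, c, q, hl, hbl, hfold⟩ := invariant (h0 :: rest) h0 rfl
  have halne : getIndicesOfChromosomes_alt (h0 :: rest) ≠ [] := by
    rintro he; rw [he] at hbl; simp at hbl
  unfold getIndicesOfChromosomes
  rw [PySem.List.pyGet?_zero_cons]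
  simp only [hfold, pvSetLast2_idem]
  -- pvSetLast2 (alt pos) (n-1) = alt pos since the last entry's end is already n-1
  have hg : (getIndicesOfChromosomes_alt (h0 :: rest)).getLast halne
      = [c, s, ((h0 :: rest).length : Int) - 1] := by
    have h2 := List.getLast?_eq_some_getLast (l := getIndicesOfChromosomes_alt (h0 :: rest)) halne
    rw [h2] at hbl; exact Option.some.inj hbl
  have e : getIndicesOfChromosomes_alt (h0 :: rest)
      = (getIndicesOfChromosomes_alt (h0 :: rest)).dropLast
        ++ [[c, s, ((h0 :: rest).length : Int) - 1]] := by
    conv_lhs => rw [← List.dropLast_append_getLast halne, hg]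
  calc pvSetLast2 (getIndicesOfChromosomes_alt (h0 :: rest)) (((h0 :: rest).length : Int) - 1)
      = pvSetLast2 ((getIndicesOfChromosomes_alt (h0 :: rest)).dropLast
          ++ [[c, s, ((h0 :: rest).length : Int) - 1]]) (((h0 :: rest).length : Int) - 1) := by
        rw [← e]
    _ = (getIndicesOfChromosomes_alt (h0 :: rest)).dropLast
          ++ [[c, s, ((h0 :: rest).length : Int) - 1]] := by rw [pvSetLast2_append]; rfl
    _ = getIndicesOfChromosomes_alt (h0 :: rest) := e.symm

-- ===== VERDICT (by name: the statement is the Claim_ definition above) =====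
theorem getIndicesOfChromosomes_spec : Claim_equal_getIndicesOfChromosomes := by
  intro pos _ hpre
  exact main_eq pos hpre.1
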